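-- pv_equiv track=rewrite | github.com/Mohtawfik/Coding-Solutions | Splitwise Minimum Transaction.py | user_index_mapping
-- ===== SOURCE A (Python) =====
-- def user_index_mapping(bill_input):
--     users = dict()
--     index=0
--     for entry in bill_input:
--         for name in entry.keys():
--             if name not in users:
--                 users[name]=index
--                 index+=1
--     return users
-- ===== SOURCE B (Python) =====
-- def user_index_mapping(bill_input):
--     # stateless closed form: a name is emitted at its first occurrence, and its
--     # index is the number of distinct names strictly before that occurrence --
--     # no running counter or seen-dict is maintained
--     names = [name for entry in bill_input for name in entry]
--     return {name: len(set(names[:i]))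
--             for i, name in enumerate(names)
--             if name not in names[:i]}
-- ===== Notes on version B (the rewrite author's own statement) =====
-- stated objective: alternative
-- what changed: Replaces the stateful single pass (seen-dict plus running index counter) with a stateless per-position closed form: each name is emitted at its first occurrence and its index is computed independently as the number of distinct names in the prefix before it (len(set(names[:i]))), trading linear time for quadratic brute force with no mutable state.
import Mathlib
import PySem

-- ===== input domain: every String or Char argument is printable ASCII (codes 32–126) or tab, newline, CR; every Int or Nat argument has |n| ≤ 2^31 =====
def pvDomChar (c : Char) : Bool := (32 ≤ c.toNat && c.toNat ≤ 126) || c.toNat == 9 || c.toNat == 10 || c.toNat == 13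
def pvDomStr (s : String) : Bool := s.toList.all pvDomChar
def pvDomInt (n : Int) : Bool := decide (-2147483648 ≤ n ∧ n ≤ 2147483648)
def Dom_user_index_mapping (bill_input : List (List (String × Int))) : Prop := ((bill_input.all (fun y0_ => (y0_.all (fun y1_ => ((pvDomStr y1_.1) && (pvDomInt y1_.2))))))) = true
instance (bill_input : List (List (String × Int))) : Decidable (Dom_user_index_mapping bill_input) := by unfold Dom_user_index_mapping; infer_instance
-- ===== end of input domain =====

-- B replaces A's stateful pass (seen-dict + running counter) with a stateless per-position closed form: a name is emitted at its first occurrence with index = number of distinct names in the preceding prefix (alternative algorithm, same results).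


-- ===== PORT A =====
-- the loop body: 'if name not in users: users[name]=index; index+=1' on state (users, index)
def uimStep (st : PySem.Dict String Int × Int) (name : String) : PySem.Dict String Int × Int :=
  if st.1.contains name then st else (st.1.insert name st.2, st.2 + 1)

def user_index_mapping (bill_input : List (List (String × Int))) : List (String × Int) :=
  (bill_input.foldl
    (fun st entry => (entry.map Prod.fst).foldl uimStep st)
    (PySem.Dict.empty, 0)).1.items

-- ===== PORT B =====
-- dict comprehension: the 'if name not in names[:i]' guard makes every key unique,
-- so the resulting dict's items are exactly the generated pairs in order (filterMap)
def user_index_mapping_alt (bill_input : List (List (String × Int))) : List (String × Int) :=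
  let names := bill_input.flatMap (fun entry => entry.map Prod.fst)
  (PySem.List.enumerate names).filterMap (fun p =>
    if p.2 ∈ PySem.List.slice names none (some p.1) then none
    else some (p.2, ((PySem.Set.ofList (PySem.List.slice names none (some p.1))).length : Int)))

-- ===== PRECONDITION & SPEC =====
def Spec_user_index_mapping (bill_input : List (List (String × Int))) (out : List (String × Int)) : Prop := out = user_index_mapping_alt bill_input
instance (bill_input : List (List (String × Int))) (out : List (String × Int)) : Decidable (Spec_user_index_mapping bill_input out) := by unfold Spec_user_index_mapping; infer_instance

-- ===== CLAIM (what is proved, stated in full; the proofs are below) =====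
def Claim_equal_user_index_mapping : Prop := ∀ (bill_input : List (List (String × Int))), Dom_user_index_mapping bill_input → Spec_user_index_mapping bill_input (user_index_mapping bill_input)

-- ===== LEMMAS AND PROOFS =====

-- the dict A has built after seeing exactly the distinct names 'acc' (in order)
def uimDictOf (acc : List String) : PySem.Dict String Int :=
  PySem.Dict.mk ((PySem.List.enumerate acc).map (fun p => (p.2, p.1)))

theorem uim_any_enumerate (name : String) (acc : List String) : ∀ (s : Int),
    ((PySem.List.enumerate acc s).any (fun p => p.2 == name)) = decide (name ∈ acc) := by
  induction acc with
  | nil => intro s; simp [PySem.List.enumerate_nil]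
  | cons x xs ih =>
    intro s
    simp only [PySem.List.enumerate_cons, List.any_cons, ih, List.mem_cons]
    by_cases hx : x = name
    · simp [hx]
    · have hx' : ¬ name = x := fun h => hx h.symm
      simp [hx, hx']

theorem contains_uimDictOf (acc : List String) (name : String) :
    (uimDictOf acc).contains name = decide (name ∈ acc) := by
  rw [uimDictOf, PySem.Dict.contains_mk, List.any_map]
  exact uim_any_enumerate name acc 0

theorem uimDictOf_insert (acc : List String) (name : String)
    (h : name ∉ acc) :
    (uimDictOf acc).insert name (acc.length : Int) = uimDictOf (acc ++ [name]) := by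
  apply PySem.Dict.ext
  rw [PySem.Dict.items_insert_of_not_contains _ _ (by rw [contains_uimDictOf]; simpa using h)]
  simp [uimDictOf, PySem.List.enumerate_append, PySem.List.enumerate_cons,
    PySem.List.enumerate_nil]

theorem uim_fold_step (ns : List String) : ∀ (acc : List String),
    ns.foldl uimStep (uimDictOf acc, (acc.length : Int)) =
      (uimDictOf (PySem.Set.update acc ns), ((PySem.Set.update acc ns).length : Int)) := by
  induction ns with
  | nil => intro acc; simp [PySem.Set.update]
  | cons n ns ih =>
    intro acc
    have hupd : PySem.Set.update acc (n :: ns) = PySem.Set.update (PySem.Set.add acc n) ns := by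
      simp [PySem.Set.update]
    rw [List.foldl_cons, hupd]
    by_cases h : n ∈ acc
    · have hs : uimStep (uimDictOf acc, (acc.length : Int)) n = (uimDictOf acc, (acc.length : Int)) := by
        simp [uimStep, contains_uimDictOf, h]
      have ha : PySem.Set.add acc n = acc := by
        simp [PySem.Set.add, PySem.Set.contains, h]
      rw [hs, ha, ih]
    · have hs : uimStep (uimDictOf acc, (acc.length : Int)) n
          = (uimDictOf (acc ++ [n]), ((acc ++ [n]).length : Int)) := by
        unfold uimStep
        rw [contains_uimDictOf]
        simp [h, uimDictOf_insert acc n h]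
      have ha : PySem.Set.add acc n = acc ++ [n] := by
        simp [PySem.Set.add, PySem.Set.contains, h]
      rw [hs, ha, ih]

-- Set.update only extends its first argument
theorem update_extends (ys : List String) : ∀ (s : List String),
    ∃ zs, PySem.Set.update s ys = s ++ zs := by
  induction ys with
  | nil => intro s; exact ⟨[], by simp [PySem.Set.update]⟩
  | cons y ys ih =>
    intro s
    have hupd : PySem.Set.update s (y :: ys) = PySem.Set.update (PySem.Set.add s y) ys := by
      simp [PySem.Set.update]
    by_cases h : y ∈ s
    · have ha : PySem.Set.add s y = s := by simp [PySem.Set.add, PySem.Set.contains, h]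
      obtain ⟨zs, hz⟩ := ih s
      exact ⟨zs, by rw [hupd, ha, hz]⟩
    · have ha : PySem.Set.add s y = s ++ [y] := by simp [PySem.Set.add, PySem.Set.contains, h]
      obtain ⟨zs, hz⟩ := ih (s ++ [y])
      exact ⟨[y] ++ zs, by rw [hupd, ha, hz, List.append_assoc]⟩

theorem ofList_append_singleton (pre : List String) (n : String) :
    PySem.Set.ofList (pre ++ [n]) = PySem.Set.add (PySem.Set.ofList pre) n := by
  simp [PySem.Set.ofList_eq_foldl, List.foldl_append]

-- B's filterMap over the suffix 'rest' of names (preceded by 'pre') produces the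
-- newly-discovered distinct names paired with the distinct counts, in order
theorem uim_alt_go (names : List String) : ∀ (rest pre : List String),
    pre ++ rest = names →
    (PySem.List.enumerate rest (pre.length : Int)).filterMap (fun p =>
        if p.2 ∈ PySem.List.slice names none (some p.1) then none
        else some (p.2, ((PySem.Set.ofList (PySem.List.slice names none (some p.1))).length : Int)))
      = (PySem.List.enumerate
            ((PySem.Set.update (PySem.Set.ofList pre) rest).drop (PySem.Set.ofList pre).length)
            ((PySem.Set.ofList pre).length : Int)).map (fun p => (p.2, p.1)) := by
  intro rest
  induction rest with
  | nil =>
    intro pre _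
    simp [PySem.List.enumerate_nil, PySem.Set.update]
  | cons n rest ih =>
    intro pre hnames
    have hslice : PySem.List.slice names none (some ((pre.length : Nat) : Int)) = pre := by
      rw [PySem.List.slice_to_natCast, ← hnames, List.take_left]
    have hupd : PySem.Set.update (PySem.Set.ofList pre) (n :: rest)
        = PySem.Set.update (PySem.Set.ofList (pre ++ [n])) rest := by
      rw [ofList_append_singleton]; simp [PySem.Set.update]
    rw [PySem.List.enumerate_cons, List.filterMap_cons]
    by_cases h : n ∈ pre
    · have hmemS : n ∈ PySem.Set.ofList pre := by rw [PySem.Set.mem_ofList]; exact h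
      have hS : PySem.Set.ofList (pre ++ [n]) = PySem.Set.ofList pre := by
        rw [ofList_append_singleton, PySem.Set.add_of_mem hmemS]
      have htail := ih (pre ++ [n]) (by simpa [List.append_assoc] using hnames)
      simp only [hslice, if_pos h]
      rw [show ((pre.length : Int) + 1) = (((pre ++ [n]).length : Nat) : Int) by simp,
        htail, hupd, hS]
    · have hmemS : n ∉ PySem.Set.ofList pre := by rw [PySem.Set.mem_ofList]; exact h
      have hS : PySem.Set.ofList (pre ++ [n]) = PySem.Set.ofList pre ++ [n] := by
        rw [ofList_append_singleton, PySem.Set.add_of_not_mem hmemS]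
      have htail := ih (pre ++ [n]) (by simpa [List.append_assoc] using hnames)
      obtain ⟨zs, hz⟩ := update_extends rest (PySem.Set.ofList (pre ++ [n]))
      have hdrop1 : (PySem.Set.update (PySem.Set.ofList pre) (n :: rest)).drop
          (PySem.Set.ofList pre).length = n :: zs := by
        rw [hupd, hz, hS, List.append_assoc]
        simp
      have hdrop2 : (PySem.Set.update (PySem.Set.ofList (pre ++ [n])) rest).drop
          (PySem.Set.ofList (pre ++ [n])).length = zs := by
        rw [hz]; simp
      simp only [hslice, if_neg h]
      rw [show ((pre.length : Int) + 1) = (((pre ++ [n]).length : Nat) : Int) by simp,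
        htail, hdrop1, hdrop2, PySem.List.enumerate_cons]
      have hlen : ((PySem.Set.ofList (pre ++ [n])).length : Int)
          = ((PySem.Set.ofList pre).length : Int) + 1 := by rw [hS]; push_cast; simp
      rw [hlen]
      rfl

-- ===== VERDICT (by name: the statement is the Claim_ definition above) =====
theorem user_index_mapping_spec : Claim_equal_user_index_mapping := by
  intro bill _
  unfold Spec_user_index_mapping user_index_mapping user_index_mapping_alt
  rw [← List.foldl_flatMap]
  have h0 : (PySem.Dict.empty : PySem.Dict String Int) = uimDictOf [] := rfl
  have h1 : (0 : Int) = (([] : List String).length : Int) := rfl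
  rw [h0, h1, uim_fold_step]
  rw [uim_alt_go (bill.flatMap fun entry => entry.map Prod.fst)
    (bill.flatMap fun entry => entry.map Prod.fst) [] rfl]
  rfl
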